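-- pv_equiv track=rewrite | github.com/CIRISAI/CIRISAgent | tools/telemetry_tool/core/doc_parser.py | _infer_source_path
-- ===== SOURCE A (Python) =====
-- def _infer_source_path(module_name: str, module_type: str) -> str:
--     """Infer the source code path from module name and type"""
--     base = "ciris_engine/logic"
--
--     # Clean up module name
--     name = module_name.lower().replace("_telemetry", "")
--
--     if module_type == "BUS":
--         return f"{base}/buses/{name}.py"
--     elif module_type == "SERVICE":
--         # Services are in various subdirectories
--         if (
--             "memory" in name
--             or "config" in name
--             or "telemetry" in name
--             or "audit" in name
--             or "incident" in name
--             or "tsdb" in name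
--         ):
--             return f"{base}/services/graph/{name}.py"
--         elif any(
--             x in name
--             for x in ["time", "shutdown", "initialization", "authentication", "resource", "database", "secrets"]
--         ):
--             return f"{base}/services/infrastructure/{name}.py"
--         elif any(x in name for x in ["wise", "adaptive", "visibility", "self_observation"]):
--             return f"{base}/services/governance/{name}.py"
--         elif any(x in name for x in ["llm", "runtime", "task"]):
--             return f"{base}/services/runtime/{name}.py"
--         elif "tool" in name:
--             return f"{base}/services/tools/{name}.py"
--     elif module_type == "COMPONENT":
--         if "circuit" in name:
--             return f"{base}/registries/circuit_breaker.py"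
--         elif "queue" in name:
--             return f"{base}/runtime/processing_queue.py"
--         elif "initializer" in name:
--             return f"{base}/initialization/service_initializer.py"
--     elif module_type == "REGISTRY":
--         return f"{base}/registries/base.py"
--     elif module_type == "PROCESSOR":
--         return f"{base}/core/agent_processor.py"
--     elif module_type == "ADAPTER":
--         adapter_name = name.replace("_adapter", "").lower()
--         return f"{base}/adapters/{adapter_name}/adapter.py"
--
--     return f"{base}/{name}.py"
-- ===== SOURCE B (Python) =====
-- # Inverted-index rewrite: one flat keyword->priority map per branchy module_type;
-- # collect every matching priority in one pass and keep the minimum, instead of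
-- # testing rows in order with early returns.  (objective: alternative decomposition)
--
-- _SERVICE_KEYWORD_ROW = {
--     "memory": 0, "config": 0, "telemetry": 0, "audit": 0, "incident": 0, "tsdb": 0,
--     "time": 1, "shutdown": 1, "initialization": 1, "authentication": 1,
--     "resource": 1, "database": 1, "secrets": 1,
--     "wise": 2, "adaptive": 2, "visibility": 2, "self_observation": 2,
--     "llm": 3, "runtime": 3, "task": 3,
--     "tool": 4,
-- }
-- _SERVICE_ROWS = ["graph", "infrastructure", "governance", "runtime", "tools"]
--
-- _COMPONENT_KEYWORD_ROW = {"circuit": 0, "queue": 1, "initializer": 2}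
-- _COMPONENT_ROWS = [
--     "registries/circuit_breaker.py",
--     "runtime/processing_queue.py",
--     "initialization/service_initializer.py",
-- ]
--
--
-- def _best_row(name, keyword_row):
--     """Smallest priority among all keywords occurring in name, or None."""
--     hits = [row for kw, row in keyword_row.items() if kw in name]
--     return min(hits) if hits else None
--
--
-- def _infer_source_path(module_name: str, module_type: str) -> str:
--     base = "ciris_engine/logic"
--     name = module_name.lower().replace("_telemetry", "")
--
--     if module_type == "BUS":
--         return f"{base}/buses/{name}.py"
--     if module_type == "REGISTRY":
--         return f"{base}/registries/base.py"
--     if module_type == "PROCESSOR":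
--         return f"{base}/core/agent_processor.py"
--     if module_type == "ADAPTER":
--         return f"{base}/adapters/{name.replace('_adapter', '').lower()}/adapter.py"
--     if module_type == "SERVICE":
--         row = _best_row(name, _SERVICE_KEYWORD_ROW)
--         if row is not None:
--             return f"{base}/services/{_SERVICE_ROWS[row]}/{name}.py"
--     if module_type == "COMPONENT":
--         row = _best_row(name, _COMPONENT_KEYWORD_ROW)
--         if row is not None:
--             return f"{base}/{_COMPONENT_ROWS[row]}"
--     return f"{base}/{name}.py"
-- ===== Notes on version B (the rewrite author's own statement) =====
-- stated objective: alternative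
-- what changed: The ordered SERVICE/COMPONENT if/elif-plus-any() chains become a flat inverted index (keyword -> row priority): one pass collects every matching priority and the minimum selects the row, instead of testing rows in priority order with early returns; trivial module types stay direct returns.
import Mathlib
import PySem

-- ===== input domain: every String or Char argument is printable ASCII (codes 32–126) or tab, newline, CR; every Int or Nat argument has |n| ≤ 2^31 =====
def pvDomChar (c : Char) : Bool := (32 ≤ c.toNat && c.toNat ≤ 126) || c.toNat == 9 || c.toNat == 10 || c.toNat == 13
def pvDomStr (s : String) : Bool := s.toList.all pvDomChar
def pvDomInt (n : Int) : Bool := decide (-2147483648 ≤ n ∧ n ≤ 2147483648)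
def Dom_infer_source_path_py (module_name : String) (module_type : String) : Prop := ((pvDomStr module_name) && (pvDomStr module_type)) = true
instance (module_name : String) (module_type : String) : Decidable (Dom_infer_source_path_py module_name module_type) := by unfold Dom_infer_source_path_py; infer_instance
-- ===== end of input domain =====

-- B replaces A's ordered if/elif keyword chains by a flat inverted index
-- (keyword -> priority): it collects every matching priority in one pass and
-- keeps the minimum; same return values, alternative decomposition.

-- ===== PORT A =====
def infer_source_path_py (module_name : String) (module_type : String) : String :=
  let base := "ciris_engine/logic"
  let name := PySem.Str.replace (PySem.Str.lower module_name) "_telemetry" ""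
  if module_type == "BUS" then
    base ++ "/buses/" ++ name ++ ".py"
  else if module_type == "SERVICE" then
    if PySem.Str.isIn "memory" name || PySem.Str.isIn "config" name || PySem.Str.isIn "telemetry" name
        || PySem.Str.isIn "audit" name || PySem.Str.isIn "incident" name || PySem.Str.isIn "tsdb" name then
      base ++ "/services/graph/" ++ name ++ ".py"
    else if ["time", "shutdown", "initialization", "authentication", "resource", "database", "secrets"].any
        (fun x => PySem.Str.isIn x name) then
      base ++ "/services/infrastructure/" ++ name ++ ".py"
    else if ["wise", "adaptive", "visibility", "self_observation"].any (fun x => PySem.Str.isIn x name) then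
      base ++ "/services/governance/" ++ name ++ ".py"
    else if ["llm", "runtime", "task"].any (fun x => PySem.Str.isIn x name) then
      base ++ "/services/runtime/" ++ name ++ ".py"
    else if PySem.Str.isIn "tool" name then
      base ++ "/services/tools/" ++ name ++ ".py"
    else
      base ++ "/" ++ name ++ ".py"     -- fall-through to the final return
  else if module_type == "COMPONENT" then
    if PySem.Str.isIn "circuit" name then
      base ++ "/registries/circuit_breaker.py"
    else if PySem.Str.isIn "queue" name then
      base ++ "/runtime/processing_queue.py"
    else if PySem.Str.isIn "initializer" name then
      base ++ "/initialization/service_initializer.py"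
    else
      base ++ "/" ++ name ++ ".py"     -- fall-through to the final return
  else if module_type == "REGISTRY" then
    base ++ "/registries/base.py"
  else if module_type == "PROCESSOR" then
    base ++ "/core/agent_processor.py"
  else if module_type == "ADAPTER" then
    let adapter_name := PySem.Str.lower (PySem.Str.replace name "_adapter" "")
    base ++ "/adapters/" ++ adapter_name ++ "/adapter.py"
  else
    base ++ "/" ++ name ++ ".py"

-- ===== PORT B =====
-- the flat keyword -> priority dict (insertion order irrelevant: only min is used)
def pvServiceKeywordRow : List (String × Int) :=
  [("memory", 0), ("config", 0), ("telemetry", 0), ("audit", 0), ("incident", 0), ("tsdb", 0),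
   ("time", 1), ("shutdown", 1), ("initialization", 1), ("authentication", 1),
   ("resource", 1), ("database", 1), ("secrets", 1),
   ("wise", 2), ("adaptive", 2), ("visibility", 2), ("self_observation", 2),
   ("llm", 3), ("runtime", 3), ("task", 3),
   ("tool", 4)]

def pvServiceRows : List String := ["graph", "infrastructure", "governance", "runtime", "tools"]

def pvComponentKeywordRow : List (String × Int) :=
  [("circuit", 0), ("queue", 1), ("initializer", 2)]

def pvComponentRows : List String :=
  ["registries/circuit_breaker.py", "runtime/processing_queue.py",
   "initialization/service_initializer.py"]

-- _best_row: the comprehension is ported as filter-then-map (exact);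
-- 'min(hits) if hits else None' is PySem.List.min?, which is none exactly on []
def pvBestRow (name : String) (keyword_row : List (String × Int)) : Option Int :=
  let hits := (keyword_row.filter (fun p => PySem.Str.isIn p.1 name)).map Prod.snd
  PySem.List.min? hits (fun x => x)

def infer_source_path_py_alt (module_name : String) (module_type : String) : String :=
  let base := "ciris_engine/logic"
  let name := PySem.Str.replace (PySem.Str.lower module_name) "_telemetry" ""
  if module_type == "BUS" then
    base ++ "/buses/" ++ name ++ ".py"
  else if module_type == "REGISTRY" then
    base ++ "/registries/base.py"
  else if module_type == "PROCESSOR" then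
    base ++ "/core/agent_processor.py"
  else if module_type == "ADAPTER" then
    base ++ "/adapters/" ++ PySem.Str.lower (PySem.Str.replace name "_adapter" "") ++ "/adapter.py"
  else if module_type == "SERVICE" then
    match pvBestRow name pvServiceKeywordRow with
    | some row =>
      -- _SERVICE_ROWS[row]: the index returned by _best_row is always in range
      -- (proved in the lemmas), so the .getD default is unreachable
      base ++ "/services/" ++ (PySem.List.pyGet? pvServiceRows row).getD "" ++ "/" ++ name ++ ".py"
    | none => base ++ "/" ++ name ++ ".py"
  else if module_type == "COMPONENT" then
    match pvBestRow name pvComponentKeywordRow with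
    | some row =>
      base ++ "/" ++ (PySem.List.pyGet? pvComponentRows row).getD ""
    | none => base ++ "/" ++ name ++ ".py"
  else
    base ++ "/" ++ name ++ ".py"

-- ===== PRECONDITION & SPEC =====
def Spec_infer_source_path_py (module_name : String) (module_type : String) (out : String) : Prop := out = infer_source_path_py_alt module_name module_type
instance (module_name : String) (module_type : String) (out : String) : Decidable (Spec_infer_source_path_py module_name module_type out) := by unfold Spec_infer_source_path_py; infer_instance

-- ===== CLAIM (what is proved, stated in full; the proofs are below) =====
def Claim_equal_infer_source_path_py : Prop := ∀ (module_name : String) (module_type : String), Dom_infer_source_path_py module_name module_type → Spec_infer_source_path_py module_name module_type (infer_source_path_py module_name module_type)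

-- ===== LEMMAS AND PROOFS =====

-- the hit list of a keyword table, and the row groups the tables split into
def pvHits (name : String) (t : List (String × Int)) : List Int :=
  (t.filter (fun p => PySem.Str.isIn p.1 name)).map Prod.snd

def pvG0 : List (String × Int) :=
  [("memory", 0), ("config", 0), ("telemetry", 0), ("audit", 0), ("incident", 0), ("tsdb", 0)]
def pvG1 : List (String × Int) :=
  [("time", 1), ("shutdown", 1), ("initialization", 1), ("authentication", 1),
   ("resource", 1), ("database", 1), ("secrets", 1)]
def pvG2 : List (String × Int) :=
  [("wise", 2), ("adaptive", 2), ("visibility", 2), ("self_observation", 2)]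
def pvG3 : List (String × Int) := [("llm", 3), ("runtime", 3), ("task", 3)]
def pvG4 : List (String × Int) := [("tool", 4)]
def pvC0 : List (String × Int) := [("circuit", 0)]
def pvC1 : List (String × Int) := [("queue", 1)]
def pvC2 : List (String × Int) := [("initializer", 2)]

theorem pvBestRow_eq (name : String) (t : List (String × Int)) :
    pvBestRow name t = PySem.List.min? (pvHits name t) (fun x => x) := rfl

theorem pvHits_append (name : String) (s t : List (String × Int)) :
    pvHits name (s ++ t) = pvHits name s ++ pvHits name t := by
  simp [pvHits, List.filter_append]

theorem pvHits_elem_of (name : String) (t : List (String × Int)) (a : Int)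
    (h : ∀ p ∈ t, p.2 = a) : ∀ x ∈ pvHits name t, x = a := by
  intro x hx
  simp only [pvHits, List.mem_map, List.mem_filter] at hx
  obtain ⟨p, ⟨hp, _⟩, rfl⟩ := hx
  exact h p hp

theorem pvHits_nil_iff (name : String) (t : List (String × Int)) :
    pvHits name t = [] ↔ ∀ p ∈ t, ¬ PySem.Str.isIn p.1 name = true := by
  simp [pvHits, List.filter_eq_nil_iff]

theorem pv_min?_append_const (a : Int) (l r : List Int)
    (hl : ∀ x ∈ l, x = a) (hr : ∀ x ∈ r, a ≤ x) (hne : l ≠ []) :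
    PySem.List.min? (l ++ r) (fun x => x) = some a := by
  obtain ⟨x, hx⟩ := List.exists_mem_of_ne_nil l hne
  cases h : PySem.List.min? (l ++ r) (fun x => x) with
  | none =>
    rw [PySem.List.min?_eq_none_iff] at h
    rcases List.append_eq_nil_iff.mp h with ⟨h1, _⟩
    exact absurd h1 hne
  | some m =>
    have hm := PySem.List.min?_mem h
    have hmin := PySem.List.min?_isMin h x (List.mem_append_left _ hx)
    have h1 : a ≤ m := by
      rcases List.mem_append.mp hm with h2 | h2
      · exact (hl m h2).ge
      · exact hr m h2
    have h2 : m = a := le_antisymm ((hl x hx) ▸ hmin) h1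
    rw [h2]

-- evaluating pvBestRow on the two tables, as the priority-ordered if-chain
set_option maxRecDepth 4000 in
theorem pvBestRow_service (name : String) :
    pvBestRow name pvServiceKeywordRow =
      (if PySem.Str.isIn "memory" name || (PySem.Str.isIn "config" name || (PySem.Str.isIn "telemetry" name
          || (PySem.Str.isIn "audit" name || (PySem.Str.isIn "incident" name || PySem.Str.isIn "tsdb" name)))) then some 0
       else if PySem.Str.isIn "time" name || (PySem.Str.isIn "shutdown" name || (PySem.Str.isIn "initialization" name
          || (PySem.Str.isIn "authentication" name || (PySem.Str.isIn "resource" name || (PySem.Str.isIn "database" name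
          || PySem.Str.isIn "secrets" name))))) then some 1
       else if PySem.Str.isIn "wise" name || (PySem.Str.isIn "adaptive" name || (PySem.Str.isIn "visibility" name
          || PySem.Str.isIn "self_observation" name)) then some 2
       else if PySem.Str.isIn "llm" name || (PySem.Str.isIn "runtime" name || PySem.Str.isIn "task" name) then some 3
       else if PySem.Str.isIn "tool" name then some 4
       else none) := by
  have hsplit : pvHits name pvServiceKeywordRow =
      pvHits name pvG0 ++ (pvHits name pvG1 ++ (pvHits name pvG2 ++ (pvHits name pvG3 ++ pvHits name pvG4))) := by
    rw [show pvServiceKeywordRow = pvG0 ++ (pvG1 ++ (pvG2 ++ (pvG3 ++ pvG4))) from rfl]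
    simp only [pvHits_append]
  have he0 := pvHits_elem_of name pvG0 0 (by decide)
  have he1 := pvHits_elem_of name pvG1 1 (by decide)
  have he2 := pvHits_elem_of name pvG2 2 (by decide)
  have he3 := pvHits_elem_of name pvG3 3 (by decide)
  have he4 := pvHits_elem_of name pvG4 4 (by decide)
  rw [pvBestRow_eq, hsplit]
  by_cases hb0 : (PySem.Str.isIn "memory" name || (PySem.Str.isIn "config" name || (PySem.Str.isIn "telemetry" name
      || (PySem.Str.isIn "audit" name || (PySem.Str.isIn "incident" name || PySem.Str.isIn "tsdb" name))))) = true
  · have hne : pvHits name pvG0 ≠ [] := by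
      intro hnil
      rw [pvHits_nil_iff] at hnil
      simp only [Bool.or_eq_true] at hb0
      rcases hb0 with h | h | h | h | h | h
      · exact (hnil ("memory", 0) (by simp [pvG0])) h
      · exact (hnil ("config", 0) (by simp [pvG0])) h
      · exact (hnil ("telemetry", 0) (by simp [pvG0])) h
      · exact (hnil ("audit", 0) (by simp [pvG0])) h
      · exact (hnil ("incident", 0) (by simp [pvG0])) h
      · exact (hnil ("tsdb", 0) (by simp [pvG0])) h
    have hrest : ∀ x ∈ (pvHits name pvG1 ++ (pvHits name pvG2 ++ (pvHits name pvG3 ++ pvHits name pvG4))), (0:Int) ≤ x := by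
      intro x hx
      simp only [List.mem_append] at hx
      rcases hx with h | h | h | h
      · rw [he1 x h]; norm_num
      · rw [he2 x h]; norm_num
      · rw [he3 x h]; norm_num
      · rw [he4 x h]; norm_num
    rw [pv_min?_append_const 0 _ _ he0 hrest hne, if_pos hb0]
  · have h0 : pvHits name pvG0 = [] := by
      rw [pvHits_nil_iff]
      intro p hp
      simp only [Bool.or_eq_true, not_or] at hb0
      fin_cases hp
      exacts [hb0.1, hb0.2.1, hb0.2.2.1, hb0.2.2.2.1, hb0.2.2.2.2.1, hb0.2.2.2.2.2]
    rw [h0, List.nil_append, if_neg hb0]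
    by_cases hb1 : (PySem.Str.isIn "time" name || (PySem.Str.isIn "shutdown" name || (PySem.Str.isIn "initialization" name
        || (PySem.Str.isIn "authentication" name || (PySem.Str.isIn "resource" name || (PySem.Str.isIn "database" name
        || PySem.Str.isIn "secrets" name)))))) = true
    · have hne : pvHits name pvG1 ≠ [] := by
        intro hnil
        rw [pvHits_nil_iff] at hnil
        simp only [Bool.or_eq_true] at hb1
        rcases hb1 with h | h | h | h | h | h | h
        · exact (hnil ("time", 1) (by simp [pvG1])) h
        · exact (hnil ("shutdown", 1) (by simp [pvG1])) h
        · exact (hnil ("initialization", 1) (by simp [pvG1])) h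
        · exact (hnil ("authentication", 1) (by simp [pvG1])) h
        · exact (hnil ("resource", 1) (by simp [pvG1])) h
        · exact (hnil ("database", 1) (by simp [pvG1])) h
        · exact (hnil ("secrets", 1) (by simp [pvG1])) h
      have hrest : ∀ x ∈ (pvHits name pvG2 ++ (pvHits name pvG3 ++ pvHits name pvG4)), (1:Int) ≤ x := by
        intro x hx
        simp only [List.mem_append] at hx
        rcases hx with h | h | h
        · rw [he2 x h]; norm_num
        · rw [he3 x h]; norm_num
        · rw [he4 x h]; norm_num
      rw [pv_min?_append_const 1 _ _ he1 hrest hne, if_pos hb1]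
    · have h1 : pvHits name pvG1 = [] := by
        rw [pvHits_nil_iff]
        intro p hp
        simp only [Bool.or_eq_true, not_or] at hb1
        fin_cases hp
        exacts [hb1.1, hb1.2.1, hb1.2.2.1, hb1.2.2.2.1, hb1.2.2.2.2.1, hb1.2.2.2.2.2.1, hb1.2.2.2.2.2.2]
      rw [h1, List.nil_append, if_neg hb1]
      by_cases hb2 : (PySem.Str.isIn "wise" name || (PySem.Str.isIn "adaptive" name || (PySem.Str.isIn "visibility" name
          || PySem.Str.isIn "self_observation" name))) = true
      · have hne : pvHits name pvG2 ≠ [] := by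
          intro hnil
          rw [pvHits_nil_iff] at hnil
          simp only [Bool.or_eq_true] at hb2
          rcases hb2 with h | h | h | h
          · exact (hnil ("wise", 2) (by simp [pvG2])) h
          · exact (hnil ("adaptive", 2) (by simp [pvG2])) h
          · exact (hnil ("visibility", 2) (by simp [pvG2])) h
          · exact (hnil ("self_observation", 2) (by simp [pvG2])) h
        have hrest : ∀ x ∈ (pvHits name pvG3 ++ pvHits name pvG4), (2:Int) ≤ x := by
          intro x hx
          simp only [List.mem_append] at hx
          rcases hx with h | h
          · rw [he3 x h]; norm_num
          · rw [he4 x h]; norm_num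
        rw [pv_min?_append_const 2 _ _ he2 hrest hne, if_pos hb2]
      · have h2 : pvHits name pvG2 = [] := by
          rw [pvHits_nil_iff]
          intro p hp
          simp only [Bool.or_eq_true, not_or] at hb2
          fin_cases hp
          exacts [hb2.1, hb2.2.1, hb2.2.2.1, hb2.2.2.2]
        rw [h2, List.nil_append, if_neg hb2]
        by_cases hb3 : (PySem.Str.isIn "llm" name || (PySem.Str.isIn "runtime" name || PySem.Str.isIn "task" name)) = true
        · have hne : pvHits name pvG3 ≠ [] := by
            intro hnil
            rw [pvHits_nil_iff] at hnil
            simp only [Bool.or_eq_true] at hb3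
            rcases hb3 with h | h | h
            · exact (hnil ("llm", 3) (by simp [pvG3])) h
            · exact (hnil ("runtime", 3) (by simp [pvG3])) h
            · exact (hnil ("task", 3) (by simp [pvG3])) h
          have hrest : ∀ x ∈ pvHits name pvG4, (3:Int) ≤ x := by
            intro x hx
            rw [he4 x hx]; norm_num
          rw [pv_min?_append_const 3 _ _ he3 hrest hne, if_pos hb3]
        · have h3 : pvHits name pvG3 = [] := by
            rw [pvHits_nil_iff]
            intro p hp
            simp only [Bool.or_eq_true, not_or] at hb3
            fin_cases hp
            exacts [hb3.1, hb3.2.1, hb3.2.2]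
          rw [h3, List.nil_append, if_neg hb3]
          by_cases hb4 : PySem.Str.isIn "tool" name = true
          · have hne : pvHits name pvG4 ≠ [] := by
              intro hnil
              rw [pvHits_nil_iff] at hnil
              exact (hnil ("tool", 4) (by simp [pvG4])) hb4
            have := pv_min?_append_const 4 (pvHits name pvG4) [] he4 (by simp) hne
            rw [List.append_nil] at this
            rw [this, if_pos hb4]
          · have h4 : pvHits name pvG4 = [] := by
              rw [pvHits_nil_iff]
              intro p hp
              fin_cases hp
              exact hb4
            rw [h4, if_neg hb4]
            exact (PySem.List.min?_eq_none_iff _ _).mpr rfl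

set_option maxRecDepth 4000 in
theorem pvBestRow_component (name : String) :
    pvBestRow name pvComponentKeywordRow =
      (if PySem.Str.isIn "circuit" name then some 0
       else if PySem.Str.isIn "queue" name then some 1
       else if PySem.Str.isIn "initializer" name then some 2
       else none) := by
  have hsplit : pvHits name pvComponentKeywordRow =
      pvHits name pvC0 ++ (pvHits name pvC1 ++ pvHits name pvC2) := by
    rw [show pvComponentKeywordRow = pvC0 ++ (pvC1 ++ pvC2) from rfl]
    simp only [pvHits_append]
  have he0 := pvHits_elem_of name pvC0 0 (by decide)
  have he1 := pvHits_elem_of name pvC1 1 (by decide)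
  have he2 := pvHits_elem_of name pvC2 2 (by decide)
  rw [pvBestRow_eq, hsplit]
  by_cases hb0 : PySem.Str.isIn "circuit" name = true
  · have hne : pvHits name pvC0 ≠ [] := by
      intro hnil
      rw [pvHits_nil_iff] at hnil
      exact (hnil ("circuit", 0) (by simp [pvC0])) hb0
    have hrest : ∀ x ∈ (pvHits name pvC1 ++ pvHits name pvC2), (0:Int) ≤ x := by
      intro x hx
      simp only [List.mem_append] at hx
      rcases hx with h | h
      · rw [he1 x h]; norm_num
      · rw [he2 x h]; norm_num
    rw [pv_min?_append_const 0 _ _ he0 hrest hne, if_pos hb0]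
  · have h0 : pvHits name pvC0 = [] := by
      rw [pvHits_nil_iff]
      intro p hp
      fin_cases hp
      exact hb0
    rw [h0, List.nil_append, if_neg hb0]
    by_cases hb1 : PySem.Str.isIn "queue" name = true
    · have hne : pvHits name pvC1 ≠ [] := by
        intro hnil
        rw [pvHits_nil_iff] at hnil
        exact (hnil ("queue", 1) (by simp [pvC1])) hb1
      have hrest : ∀ x ∈ pvHits name pvC2, (1:Int) ≤ x := by
        intro x hx
        rw [he2 x hx]; norm_num
      rw [pv_min?_append_const 1 _ _ he1 hrest hne, if_pos hb1]
    · have h1 : pvHits name pvC1 = [] := by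
        rw [pvHits_nil_iff]
        intro p hp
        fin_cases hp
        exact hb1
      rw [h1, List.nil_append, if_neg hb1]
      by_cases hb2 : PySem.Str.isIn "initializer" name = true
      · have hne : pvHits name pvC2 ≠ [] := by
          intro hnil
          rw [pvHits_nil_iff] at hnil
          exact (hnil ("initializer", 2) (by simp [pvC2])) hb2
        have := pv_min?_append_const 2 (pvHits name pvC2) [] he2 (by simp) hne
        rw [List.append_nil] at this
        rw [this, if_pos hb2]
      · have h2 : pvHits name pvC2 = [] := by
          rw [pvHits_nil_iff]
          intro p hp
          fin_cases hp
          exact hb2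
        rw [h2, if_neg hb2]
        exact (PySem.List.min?_eq_none_iff _ _).mpr rfl

-- ===== VERDICT (by name: the statement is the Claim_ definition above) =====
set_option maxHeartbeats 1000000 in
theorem infer_source_path_py_spec : Claim_equal_infer_source_path_py := by
  intro mn mt _
  simp only [Spec_infer_source_path_py]
  by_cases hB : mt = "BUS"
  · have tB : (mt = "BUS") = True := by simp [hB]
    simp only [infer_source_path_py, infer_source_path_py_alt, beq_iff_eq, tB, if_true]
  by_cases hS : mt = "SERVICE"
  · have fB : (mt = "BUS") = False := by simp [hS]
    have fR : (mt = "REGISTRY") = False := by simp [hS]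
    have fP : (mt = "PROCESSOR") = False := by simp [hS]
    have fA : (mt = "ADAPTER") = False := by simp [hS]
    have tS : (mt = "SERVICE") = True := by simp [hS]
    simp only [infer_source_path_py, infer_source_path_py_alt, pvBestRow_service,
      List.any_cons, List.any_nil, Bool.or_false, Bool.or_assoc,
      beq_iff_eq, fB, fR, fP, fA, tS, if_true, if_false]
    split_ifs <;> simp [PySem.List.pyGet?, PySem.List.pyIdx?, pvServiceRows]
  by_cases hC : mt = "COMPONENT"
  · have fB : (mt = "BUS") = False := by simp [hC]
    have fS : (mt = "SERVICE") = False := by simp [hC]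
    have fR : (mt = "REGISTRY") = False := by simp [hC]
    have fP : (mt = "PROCESSOR") = False := by simp [hC]
    have fA : (mt = "ADAPTER") = False := by simp [hC]
    have tC : (mt = "COMPONENT") = True := by simp [hC]
    simp only [infer_source_path_py, infer_source_path_py_alt, pvBestRow_component,
      beq_iff_eq, fB, fS, fR, fP, fA, tC, if_true, if_false]
    split_ifs <;> simp [PySem.List.pyGet?, PySem.List.pyIdx?, pvComponentRows]
  by_cases hR : mt = "REGISTRY"
  · have fB : (mt = "BUS") = False := by simp [hR]
    have fS : (mt = "SERVICE") = False := by simp [hR]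
    have fC : (mt = "COMPONENT") = False := by simp [hR]
    have tR : (mt = "REGISTRY") = True := by simp [hR]
    simp only [infer_source_path_py, infer_source_path_py_alt, beq_iff_eq,
      fB, fS, fC, tR, if_true, if_false]
  by_cases hP : mt = "PROCESSOR"
  · have fB : (mt = "BUS") = False := by simp [hP]
    have fS : (mt = "SERVICE") = False := by simp [hP]
    have fC : (mt = "COMPONENT") = False := by simp [hP]
    have fR : (mt = "REGISTRY") = False := by simp [hP]
    have tP : (mt = "PROCESSOR") = True := by simp [hP]
    simp only [infer_source_path_py, infer_source_path_py_alt, beq_iff_eq,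
      fB, fS, fC, fR, tP, if_true, if_false]
  by_cases hA : mt = "ADAPTER"
  · have fB : (mt = "BUS") = False := by simp [hA]
    have fS : (mt = "SERVICE") = False := by simp [hA]
    have fC : (mt = "COMPONENT") = False := by simp [hA]
    have fR : (mt = "REGISTRY") = False := by simp [hA]
    have fP : (mt = "PROCESSOR") = False := by simp [hA]
    have tA : (mt = "ADAPTER") = True := by simp [hA]
    simp only [infer_source_path_py, infer_source_path_py_alt, beq_iff_eq,
      fB, fS, fC, fR, fP, tA, if_true, if_false]
  · have fB : (mt = "BUS") = False := by simp [hB]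
    have fS : (mt = "SERVICE") = False := by simp [hS]
    have fC : (mt = "COMPONENT") = False := by simp [hC]
    have fR : (mt = "REGISTRY") = False := by simp [hR]
    have fP : (mt = "PROCESSOR") = False := by simp [hP]
    have fA : (mt = "ADAPTER") = False := by simp [hA]
    simp only [infer_source_path_py, infer_source_path_py_alt, beq_iff_eq,
      fB, fS, fC, fR, fP, fA, if_false]
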